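-- pv_equiv track=rewrite | github.com/alepaez-dev/retos-python | ejercicio6.py | make_box_list
-- ===== SOURCE A (Python) =====
-- def make_box_list(number, symbol):
--     if not isinstance(number,int) or not isinstance(symbol,str):
--         return None, "Error"
--     space = " "
--     make_box_list = []
--     for i in range(number):
--         ##si el parametro number es 1 y 2 se agrega normal
--         if number <= 2:
--             make_box_list.append(symbol * number)
--         ##sino se agregara de manera diferente
--         else:
--             ##las primera fila y la ultima se agrega normalmente
--             if i == 0 or i == (number - 1):
--                 make_box_list.append(symbol * number)
--             ##las demas filas
--             else:
--                 make_box_list.append(symbol + (space * (number -2)) + symbol)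
--     return make_box_list
-- ===== SOURCE B (Python) =====
-- def make_box_list(number, symbol):
--     if not isinstance(number, int) or not isinstance(symbol, str):
--         return None, "Error"
--     edge = {0, number - 1}
--     cache = {}
--     out = []
--     for i in range(number):
--         k = i in edge
--         if k not in cache:
--             cache[k] = "".join(symbol if k or j in edge else " "
--                                for j in range(number))
--         out.append(cache[k])
--     return out
-- ===== Notes on version B (the rewrite author's own statement) =====
-- stated objective: alternative
-- what changed: B renders rows from a 2D per-cell border predicate (cell = symbol iff its row or column index is on the edge), memoized in a dict keyed by the row's edge-flag so each distinct row is rendered once; A's row-type branching (the number<=2 special case, first/last-row case and middle-row concatenation of symbol, spaces, symbol) disappears entirely.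
import Mathlib
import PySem

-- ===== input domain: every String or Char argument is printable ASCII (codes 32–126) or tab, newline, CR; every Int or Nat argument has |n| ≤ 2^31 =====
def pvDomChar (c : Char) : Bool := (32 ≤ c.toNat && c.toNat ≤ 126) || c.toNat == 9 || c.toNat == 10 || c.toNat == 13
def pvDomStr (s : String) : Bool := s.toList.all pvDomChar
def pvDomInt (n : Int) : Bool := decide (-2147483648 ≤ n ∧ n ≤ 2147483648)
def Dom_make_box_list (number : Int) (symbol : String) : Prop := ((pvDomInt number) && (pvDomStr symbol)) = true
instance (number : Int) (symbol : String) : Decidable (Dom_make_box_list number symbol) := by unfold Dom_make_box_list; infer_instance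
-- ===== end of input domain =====

-- B renders rows from a 2D per-cell border predicate, memoized per edge-flag in a dict,
-- instead of A's per-row-type branching. Objective: alternative.
-- The Python isinstance guard never fires under the typed signature (number : Int, symbol : String) and is not ported.

-- shared helper: Python's  s * n  on a string (string repetition)
def pyStrMul (s : String) (n : Int) : String := String.ofList (PySem.List.pyRepeat s.toList n)

-- ===== PORT A =====
def make_box_list (number : Int) (symbol : String) : List String :=
  (PySem.List.pyRange 0 number 1).foldl
    (fun acc i =>
      if number ≤ 2 then
        acc ++ [pyStrMul symbol number]
      else
        if i = 0 ∨ i = number - 1 then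
          acc ++ [pyStrMul symbol number]
        else
          acc ++ [String.ofList (symbol.toList ++ PySem.List.pyRepeat [' '] (number - 2) ++ symbol.toList)])
    []

-- ===== PORT B =====
-- '"".join(symbol if k or j in edge else " " for j in range(number))' with edge = {0, number-1}
def cellRow (number : Int) (symbol : String) (k : Bool) : String :=
  String.ofList ((PySem.List.pyRange 0 number 1).flatMap (fun j =>
    if k = true ∨ j = 0 ∨ j = number - 1 then symbol.toList else [' ']))

-- Source B: for each row i, k = i in edge; render cellRow k on first use and memoize it in 'cache';
-- append cache[k] (the key was just ensured present, so the lookup is 'getD … ""' exactly).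
def make_box_list_alt (number : Int) (symbol : String) : List String :=
  ((PySem.List.pyRange 0 number 1).foldl
    (fun (st : PySem.Dict Bool String × List String) i =>
      let k : Bool := decide (i = 0 ∨ i = number - 1)
      let cache := if (st.1.get? k).isNone then st.1.insert k (cellRow number symbol k) else st.1
      (cache, st.2 ++ [cache.getD k ""]))
    (PySem.Dict.empty, [])).2

-- ===== PRECONDITION & SPEC =====
def Spec_make_box_list (number : Int) (symbol : String) (out : List String) : Prop := out = make_box_list_alt number symbol
instance (number : Int) (symbol : String) (out : List String) : Decidable (Spec_make_box_list number symbol out) := by unfold Spec_make_box_list; infer_instance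

-- ===== CLAIM =====
def Claim_equal_make_box_list : Prop := ∀ (number : Int) (symbol : String), Dom_make_box_list number symbol → Spec_make_box_list number symbol (make_box_list number symbol)

-- ===== LEMMAS AND PROOFS =====

-- pyRepeat is flatten-of-replicate
theorem pyRepeat_eq_flatten {α : Type} (l : List α) (n : Int) :
    PySem.List.pyRepeat l n = (List.replicate n.toNat l).flatten := by
  unfold PySem.List.pyRepeat
  induction n.toNat with
  | zero => simp
  | succ k _ => simp [List.replicate_succ]

-- flatMap of a constant is flatten-of-replicate
theorem flatMap_const {α β : Type} (xs : List α) (c : List β) :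
    xs.flatMap (fun _ => c) = (List.replicate xs.length c).flatten := by
  induction xs with
  | nil => simp
  | cons x xs ih => simp [List.replicate_succ, ih]

-- A's loop body is 'append one row'; the loop is a map over the range.
theorem make_box_list_eq_map (number : Int) (symbol : String) :
    make_box_list number symbol =
      (PySem.List.pyRange 0 number 1).map
        (fun i =>
          if number ≤ 2 then pyStrMul symbol number
          else if i = 0 ∨ i = number - 1 then pyStrMul symbol number
          else String.ofList (symbol.toList ++ PySem.List.pyRepeat [' '] (number - 2) ++ symbol.toList)) := by
  unfold make_box_list
  have h : (fun (acc : List String) (i : Int) =>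
      if number ≤ 2 then
        acc ++ [pyStrMul symbol number]
      else
        if i = 0 ∨ i = number - 1 then
          acc ++ [pyStrMul symbol number]
        else
          acc ++ [String.ofList (symbol.toList ++ PySem.List.pyRepeat [' '] (number - 2) ++ symbol.toList)])
      = (fun acc i => acc ++ [if number ≤ 2 then pyStrMul symbol number
          else if i = 0 ∨ i = number - 1 then pyStrMul symbol number
          else String.ofList (symbol.toList ++ PySem.List.pyRepeat [' '] (number - 2) ++ symbol.toList)]) := by
    funext acc i; split_ifs <;> rfl
  rw [h, PySem.List.foldl_append_singleton_eq_map]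
  simp

-- B's memoizing fold only ever stores cellRow k under key k, so it is the map of cellRow.
theorem alt_fold_eq_map (number : Int) (symbol : String) (l : List Int)
    (cache : PySem.Dict Bool String) (out : List String)
    (hc : ∀ k v, cache.get? k = some v → v = cellRow number symbol k) :
    (l.foldl
      (fun (st : PySem.Dict Bool String × List String) i =>
        let k : Bool := decide (i = 0 ∨ i = number - 1)
        let cache := if (st.1.get? k).isNone then st.1.insert k (cellRow number symbol k) else st.1
        (cache, st.2 ++ [cache.getD k ""]))
      (cache, out)).2
    = out ++ l.map (fun i => cellRow number symbol (decide (i = 0 ∨ i = number - 1))) := by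
  induction l generalizing cache out with
  | nil => simp
  | cons i l ih =>
    simp only [List.foldl_cons, List.map_cons]
    cases hcg : cache.get? (decide (i = 0 ∨ i = number - 1)) with
    | none =>
      simp only [Option.isNone_none, if_pos]
      rw [ih (cache.insert _ (cellRow number symbol _)) _ ?_]
      · rw [PySem.Dict.getD_insert_self]
        simp
      · intro k' v hv
        by_cases hkk : k' = decide (i = 0 ∨ i = number - 1)
        · subst hkk
          rw [PySem.Dict.get?_insert_self] at hv
          exact (Option.some.injEq _ _ ▸ hv).symm
        · rw [PySem.Dict.get?_insert_of_ne _ _ hkk] at hv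
          exact hc k' v hv
    | some v =>
      simp only [Option.isNone_some, Bool.false_eq_true, if_false]
      rw [ih cache _ hc]
      have hval : cache.getD (decide (i = 0 ∨ i = number - 1)) ""
          = cellRow number symbol (decide (i = 0 ∨ i = number - 1)) := by
        rw [PySem.Dict.getD_eq_get?_getD, hcg, Option.getD_some]
        exact hc _ v hcg
      rw [hval]
      simp

theorem alt_eq_map (number : Int) (symbol : String) :
    make_box_list_alt number symbol =
      (PySem.List.pyRange 0 number 1).map
        (fun i => cellRow number symbol (decide (i = 0 ∨ i = number - 1))) := by
  unfold make_box_list_alt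
  rw [alt_fold_eq_map number symbol _ PySem.Dict.empty []]
  · simp
  · intro k v hv
    rw [PySem.Dict.get?_empty] at hv
    exact absurd hv (by simp)

-- a border row of B is the full row symbol*number
theorem alt_row_border (number : Int) (symbol : String) :
    cellRow number symbol true = pyStrMul symbol number := by
  unfold cellRow
  have hf : (fun (j : Int) =>
      if true = true ∨ j = 0 ∨ j = number - 1 then symbol.toList else [' '])
      = (fun _ => symbol.toList) := by
    funext j; rw [if_pos (Or.inl rfl)]
  rw [hf, flatMap_const, PySem.List.length_pyRange_one]
  unfold pyStrMul
  rw [pyRepeat_eq_flatten]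
  simp

-- a non-border row of B is symbol + spaces + symbol (for number ≥ 3)
theorem alt_row_middle (number : Int) (symbol : String) (h3 : 3 ≤ number) :
    cellRow number symbol false =
    String.ofList (symbol.toList ++ PySem.List.pyRepeat [' '] (number - 2) ++ symbol.toList) := by
  unfold cellRow
  have hsplit : PySem.List.pyRange 0 number 1
      = PySem.List.pyRange 0 1 1 ++ (PySem.List.pyRange 1 (number - 1) 1 ++ PySem.List.pyRange (number - 1) number 1) := by
    rw [← PySem.List.pyRange_one_append 1 (number - 1) number (by omega) (by omega),
        ← PySem.List.pyRange_one_append 0 1 number (by omega) (by omega)]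
  rw [hsplit,
      PySem.List.pyRange_one_cons (show (0:Int) < 1 by omega),
      PySem.List.pyRange_one_eq_nil (show (1:Int) ≤ 0 + 1 by omega),
      PySem.List.pyRange_one_cons (show number - 1 < number by omega),
      PySem.List.pyRange_one_eq_nil (show number ≤ number - 1 + 1 by omega)]
  simp only [List.flatMap_append, List.flatMap_cons, List.flatMap_nil]
  rw [if_pos (by tauto), if_pos (by tauto)]
  have hmid : (PySem.List.pyRange 1 (number - 1) 1).flatMap (fun j =>
      if false = true ∨ j = 0 ∨ j = number - 1 then symbol.toList else [' '])
      = (PySem.List.pyRange 1 (number - 1) 1).flatMap (fun _ => [' ']) := by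
    apply List.flatMap_congr
    intro j hj
    rw [PySem.List.mem_pyRange_one] at hj
    rw [if_neg (by simp; omega)]
  rw [hmid, flatMap_const, PySem.List.length_pyRange_one, PySem.List.pyRepeat_singleton]
  have : (number - 1 - 1).toNat = (number - 2).toNat := by omega
  simp [this]

-- ===== VERDICT =====
theorem make_box_list_spec : Claim_equal_make_box_list := by
  intro number symbol _
  unfold Spec_make_box_list
  rw [make_box_list_eq_map, alt_eq_map]
  apply List.map_congr_left
  intro i hi
  rw [PySem.List.mem_pyRange_one] at hi
  by_cases hb : i = 0 ∨ i = number - 1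
  · rw [decide_eq_true hb, alt_row_border]
    split_ifs <;> rfl
  · have h3 : 3 ≤ number := by omega
    rw [decide_eq_false hb, alt_row_middle number symbol h3,
        if_neg (by omega), if_neg hb]
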